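-- pv_equiv track=rewrite | github.com/MovingJu/aaesongie | Lee/python/application/visualizer/bar.py | amount_separator
-- ===== SOURCE A (Python) =====
-- def amount_separator(li):
--     thresholds = [2000, 5000, 10000, 30000, 50000, 100000, 200000, 500000, 1000000]
--
--     ret_summed_li = []
--     ret_li = [[] for _ in thresholds]
--
--     for val in li:
--         val = abs(val)
--         for i, threshold in enumerate(thresholds):
--             if val <= threshold:
--                 ret_li[i].append(val)
--                 break
--
--     for val in ret_li:
--         ret_summed_li.append(int(sum(val)))
--
--     return ret_summed_li
-- ===== SOURCE B (Python) =====
-- import bisect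
--
-- def amount_separator(li):
--     thresholds = [2000, 5000, 10000, 30000, 50000, 100000, 200000, 500000, 1000000]
--     sums = [0] * len(thresholds)
--     for val in li:
--         v = abs(val)
--         i = bisect.bisect_left(thresholds, v)
--         if i < len(thresholds):
--             sums[i] += v
--     return [int(s) for s in sums]
-- ===== Notes on version B (the rewrite author's own statement) =====
-- stated objective: idiomatic
-- what changed: Replaces A's per-value linear scan over the thresholds that appends into nine per-bin lists summed afterwards with a bisect_left binary search that accumulates directly into a running-sums list, never materialising the bins.
import Mathlib
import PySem

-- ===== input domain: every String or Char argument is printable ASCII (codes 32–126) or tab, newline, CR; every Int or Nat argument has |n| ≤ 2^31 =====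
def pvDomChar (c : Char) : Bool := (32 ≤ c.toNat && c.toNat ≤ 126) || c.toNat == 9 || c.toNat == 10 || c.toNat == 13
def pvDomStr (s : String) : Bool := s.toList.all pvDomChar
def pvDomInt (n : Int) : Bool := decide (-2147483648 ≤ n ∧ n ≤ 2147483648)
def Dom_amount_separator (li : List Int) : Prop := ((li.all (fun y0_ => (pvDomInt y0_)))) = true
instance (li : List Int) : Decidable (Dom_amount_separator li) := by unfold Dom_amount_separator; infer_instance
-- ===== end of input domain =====

-- B replaces A's per-value linear scan over the thresholds (building nine bucket lists that are
-- summed afterwards) by a bisect_left binary search that adds directly into a running-sums list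
-- (objective: idiomatic/alternative; same asymptotic cost for this fixed threshold list).

-- ===== PORT A =====
-- the Python thresholds list
def pvThresholds : List Int := [2000, 5000, 10000, 30000, 50000, 100000, 200000, 500000, 1000000]

-- A's inner `for i, threshold in enumerate(thresholds): if val <= threshold: …; break`:
-- walk the thresholds in order, returning the index of the first one with v ≤ threshold.
def amountSepFind : List Int → Int → Nat → Option Nat
  | [], _, _ => none
  | t :: ts, v, i => if v ≤ t then some i else amountSepFind ts v (i + 1)

-- one iteration of A's outer loop: append |val| to the bucket found (or do nothing on no break)
def amountSepStepA (acc : List (List Int)) (val : Int) : List (List Int) :=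
  match amountSepFind pvThresholds |val| 0 with
  | some i => acc.set i (acc.getD i [] ++ [|val|])
  | none => acc

def amount_separator (li : List Int) : List Int :=
  let retLi := li.foldl amountSepStepA (pvThresholds.map (fun _ => []))
  retLi.map (fun l => l.sum)  -- int(sum(val)) on ints is the sum

-- ===== PORT B =====
-- bisect.bisect_left as CPython implements it: binary search with lo/hi; mid is always in
-- range when it is read, so getD with a default is exact there.
def bisectGo (a : List Int) (x : Int) (lo hi : Nat) : Nat :=
  if _h : lo < hi then
    if a.getD ((lo + hi) / 2) 0 < x then bisectGo a x ((lo + hi) / 2 + 1) hi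
    else bisectGo a x lo ((lo + hi) / 2)
  else lo
termination_by hi - lo
decreasing_by all_goals omega

def bisectLeft (a : List Int) (x : Int) : Nat := bisectGo a x 0 a.length

-- one iteration of B's loop: locate the bucket by binary search, add into the running sum
def amountSepStepB (sums : List Int) (val : Int) : List Int :=
  if bisectLeft pvThresholds |val| < pvThresholds.length then
    sums.set (bisectLeft pvThresholds |val|)
      (sums.getD (bisectLeft pvThresholds |val|) 0 + |val|)
  else sums

def amount_separator_alt (li : List Int) : List Int :=
  let sums := li.foldl amountSepStepB (List.replicate pvThresholds.length 0)
  sums.map (fun s => s)  -- [int(s) for s in sums]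

-- ===== PRECONDITION & SPEC =====
def Spec_amount_separator (li : List Int) (out : List Int) : Prop := out = amount_separator_alt li
instance (li : List Int) (out : List Int) : Decidable (Spec_amount_separator li out) := by unfold Spec_amount_separator; infer_instance

-- ===== CLAIM (what is proved, stated in full; the proofs are below) =====
def Claim_equal_amount_separator : Prop := ∀ (li : List Int), Dom_amount_separator li → Spec_amount_separator li (amount_separator li)

-- ===== LEMMAS AND PROOFS =====

-- closed-form bucket index used only by the proofs
def pvCls (v : Int) : Nat :=
  if v ≤ 2000 then 0 else if v ≤ 5000 then 1 else if v ≤ 10000 then 2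
  else if v ≤ 30000 then 3 else if v ≤ 50000 then 4 else if v ≤ 100000 then 5
  else if v ≤ 200000 then 6 else if v ≤ 500000 then 7 else if v ≤ 1000000 then 8 else 9

lemma bisectGo_unfold (a : List Int) (x : Int) (lo hi : Nat) :
    bisectGo a x lo hi =
      if lo < hi then
        (if a.getD ((lo + hi) / 2) 0 < x then bisectGo a x ((lo + hi) / 2 + 1) hi
         else bisectGo a x lo ((lo + hi) / 2))
      else lo := by
  rw [bisectGo]
  simp [dite_eq_ite]

-- invariant of the binary search: on a monotone list it ends at the boundary between
-- elements < x and elements ≥ x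
lemma bisectGo_inv (a : List Int) (x : Int)
    (hmono : ∀ i j : Nat, i ≤ j → j < a.length → a.getD i 0 ≤ a.getD j 0) :
    ∀ (n lo hi : Nat), hi - lo ≤ n → hi ≤ a.length →
      (∀ j, j < lo → a.getD j 0 < x) →
      (∀ j, hi ≤ j → j < a.length → ¬ a.getD j 0 < x) →
      (∀ j, j < bisectGo a x lo hi → a.getD j 0 < x) ∧
      (∀ j, bisectGo a x lo hi ≤ j → j < a.length → ¬ a.getD j 0 < x) ∧
      bisectGo a x lo hi ≤ max lo hi := by
  intro n
  induction n with
  | zero =>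
      intro lo hi hn hhi hlo h2
      have hnl : ¬ lo < hi := by omega
      rw [bisectGo_unfold]
      simp only [hnl, if_false]
      exact ⟨hlo, fun j hj hjl => h2 j (by omega) hjl, by omega⟩
  | succ n ih =>
      intro lo hi hn hhi hlo h2
      rw [bisectGo_unfold]
      by_cases h : lo < hi
      · simp only [h, if_true]
        have hmidlt : (lo + hi) / 2 < hi := by omega
        have hmidge : lo ≤ (lo + hi) / 2 := by omega
        by_cases hx : a.getD ((lo + hi) / 2) 0 < x
        · simp only [hx, if_true]
          have hlo' : ∀ j, j < (lo + hi) / 2 + 1 → a.getD j 0 < x := by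
            intro j hj
            have := hmono j ((lo + hi) / 2) (by omega) (by omega)
            omega
          obtain ⟨p1, p2, p3⟩ := ih ((lo + hi) / 2 + 1) hi (by omega) hhi hlo' h2
          exact ⟨p1, p2, by omega⟩
        · simp only [hx, if_false]
          have h2' : ∀ j, (lo + hi) / 2 ≤ j → j < a.length → ¬ a.getD j 0 < x := by
            intro j hj hjl
            have := hmono ((lo + hi) / 2) j hj hjl
            omega
          obtain ⟨p1, p2, p3⟩ := ih lo ((lo + hi) / 2) (by omega) (by omega) hlo h2'
          exact ⟨p1, p2, by omega⟩
      · simp only [h, if_false]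
        exact ⟨hlo, fun j hj hjl => h2 j (by omega) hjl, by omega⟩

lemma bisect_eq_cls (v : Int) : bisectLeft pvThresholds v = pvCls v := by
  have hmono : ∀ i j : Nat, i ≤ j → j < pvThresholds.length →
      pvThresholds.getD i 0 ≤ pvThresholds.getD j 0 := by
    intro i j hij hj
    have hj9 : j < 9 := by simpa [pvThresholds] using hj
    interval_cases j <;> interval_cases i <;> norm_num [pvThresholds]
  have hL : pvThresholds.length = 9 := by decide
  obtain ⟨A, B, hr⟩ := bisectGo_inv pvThresholds v hmono 9 0 9 (by omega) (by omega)
    (fun j hj => absurd hj (Nat.not_lt_zero j))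
    (fun j h1 h2 => absurd h1 (by omega))
  have hbl : bisectLeft pvThresholds v = bisectGo pvThresholds v 0 9 := by
    unfold bisectLeft; rw [hL]
  rw [hbl] at *
  set r := bisectGo pvThresholds v 0 9 with hrdef
  have A0 : 0 < r → (2000 : Int) < v := fun h => by simpa [pvThresholds] using A 0 h
  have A1 : 1 < r → (5000 : Int) < v := fun h => by simpa [pvThresholds] using A 1 h
  have A2 : 2 < r → (10000 : Int) < v := fun h => by simpa [pvThresholds] using A 2 h
  have A3 : 3 < r → (30000 : Int) < v := fun h => by simpa [pvThresholds] using A 3 h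
  have A4 : 4 < r → (50000 : Int) < v := fun h => by simpa [pvThresholds] using A 4 h
  have A5 : 5 < r → (100000 : Int) < v := fun h => by simpa [pvThresholds] using A 5 h
  have A6 : 6 < r → (200000 : Int) < v := fun h => by simpa [pvThresholds] using A 6 h
  have A7 : 7 < r → (500000 : Int) < v := fun h => by simpa [pvThresholds] using A 7 h
  have A8 : 8 < r → (1000000 : Int) < v := fun h => by simpa [pvThresholds] using A 8 h
  have B0 : r ≤ 0 → v ≤ (2000 : Int) := fun h => by
    have := B 0 h (by omega); simp [pvThresholds] at this; omega
  have B1 : r ≤ 1 → v ≤ (5000 : Int) := fun h => by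
    have := B 1 h (by omega); simp [pvThresholds] at this; omega
  have B2 : r ≤ 2 → v ≤ (10000 : Int) := fun h => by
    have := B 2 h (by omega); simp [pvThresholds] at this; omega
  have B3 : r ≤ 3 → v ≤ (30000 : Int) := fun h => by
    have := B 3 h (by omega); simp [pvThresholds] at this; omega
  have B4 : r ≤ 4 → v ≤ (50000 : Int) := fun h => by
    have := B 4 h (by omega); simp [pvThresholds] at this; omega
  have B5 : r ≤ 5 → v ≤ (100000 : Int) := fun h => by
    have := B 5 h (by omega); simp [pvThresholds] at this; omega
  have B6 : r ≤ 6 → v ≤ (200000 : Int) := fun h => by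
    have := B 6 h (by omega); simp [pvThresholds] at this; omega
  have B7 : r ≤ 7 → v ≤ (500000 : Int) := fun h => by
    have := B 7 h (by omega); simp [pvThresholds] at this; omega
  have B8 : r ≤ 8 → v ≤ (1000000 : Int) := fun h => by
    have := B 8 h (by omega); simp [pvThresholds] at this; omega
  have hr9 : r ≤ 9 := by omega
  unfold pvCls
  split_ifs <;> omega

lemma find_eq_cls (v : Int) :
    amountSepFind pvThresholds v 0 = if pvCls v < 9 then some (pvCls v) else none := by
  unfold pvThresholds pvCls
  simp only [amountSepFind]
  split_ifs <;> first | rfl | omega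

lemma step_eq (acc : List (List Int)) (h : acc.length = 9) (val : Int) :
    amountSepStepB (acc.map List.sum) val = (amountSepStepA acc val).map List.sum := by
  unfold amountSepStepA amountSepStepB
  rw [bisect_eq_cls, find_eq_cls]
  have hT : pvThresholds.length = 9 := by decide
  by_cases hc : pvCls |val| < 9
  · simp only [hc, hT, if_pos]
    have hlt : pvCls |val| < acc.length := by omega
    have hgd : (acc.map List.sum).getD (pvCls |val|) 0 = List.sum (acc.getD (pvCls |val|) []) := by
      rw [List.getD_eq_getElem?_getD, List.getD_eq_getElem?_getD, List.getElem?_map]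
      rw [List.getElem?_eq_getElem hlt]
      simp
    rw [hgd, List.map_set]
    simp [List.sum_append, Int.add_comm]
  · simp [hc, hT]

lemma stepA_len (acc : List (List Int)) (val : Int) :
    (amountSepStepA acc val).length = acc.length := by
  unfold amountSepStepA
  cases amountSepFind pvThresholds |val| 0 <;> simp

lemma fold_eq (li : List Int) (acc : List (List Int)) (h : acc.length = 9) :
    li.foldl amountSepStepB (acc.map List.sum) = (li.foldl amountSepStepA acc).map List.sum := by
  induction li generalizing acc with
  | nil => simp
  | cons x xs ih =>
      simp only [List.foldl_cons]
      rw [step_eq acc h x, ih _ (by rw [stepA_len]; exact h)]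

-- ===== VERDICT (by name: the statement is the Claim_ definition above) =====
theorem amount_separator_spec : Claim_equal_amount_separator := by
  intro li _
  unfold Spec_amount_separator amount_separator amount_separator_alt
  have hinit : (List.replicate pvThresholds.length (0 : Int)) =
      (pvThresholds.map (fun _ => ([] : List Int))).map List.sum := by decide
  rw [hinit, fold_eq _ _ (by decide)]
  simp
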